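-- pv_equiv track=rewrite | github.com/hyphatech/jailrun | src/jailrun/ucl.py | _dedent_heredoc_body
-- ===== SOURCE A (Python) =====
-- def _dedent_heredoc_body(body: str, indent: str) -> str:
--     """Remove terminator indentation from each line (if present)."""
--     if not body:
--         return body
--     lines = body.split("\n")
--     if not indent:
--         return body
--
--     out_lines: list[str] = []
--     for ln in lines:
--         if ln.startswith(indent):
--             out_lines.append(ln[len(indent) :])
--         else:
--             out_lines.append(ln)
--     return "\n".join(out_lines)
-- ===== SOURCE B (Python) =====
-- import re
--
--
-- def _dedent_heredoc_body(body: str, indent: str) -> str: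
--     """Remove terminator indentation from each line (if present)."""
--     if not body:
--         return body
--     if not indent:
--         return body
--     return re.sub(r"(?m)^" + re.escape(indent), "", body)
-- ===== Notes on version B (the rewrite author's own statement) =====
-- stated objective: idiomatic
-- what changed: Replaced the split("\n")/accumulator-loop/join with a single multiline-anchored regex substitution re.sub(r'(?m)^' + re.escape(indent), '', body), keeping the two early-return guards.
-- outside the precondition, e.g. on _dedent_heredoc_body('a\nb', 'a\n'): A returns 'a\nb', B returns 'b'
import Mathlib
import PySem

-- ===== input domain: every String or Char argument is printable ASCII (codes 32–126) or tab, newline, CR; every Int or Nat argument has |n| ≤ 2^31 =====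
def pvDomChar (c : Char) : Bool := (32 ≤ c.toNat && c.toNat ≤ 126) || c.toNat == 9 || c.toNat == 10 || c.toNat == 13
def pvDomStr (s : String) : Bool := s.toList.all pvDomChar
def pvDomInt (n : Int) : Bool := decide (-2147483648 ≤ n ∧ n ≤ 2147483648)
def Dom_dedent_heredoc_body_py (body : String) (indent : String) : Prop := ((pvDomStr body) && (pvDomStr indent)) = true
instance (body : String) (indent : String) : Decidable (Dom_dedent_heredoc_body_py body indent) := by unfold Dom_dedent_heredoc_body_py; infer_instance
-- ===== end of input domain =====

-- B replaces A's split/loop/join with a single multiline-anchored regex substitution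
-- (re.sub(r'(?m)^' + re.escape(indent), '', body)); objective: idiomatic, not claimed faster.

-- ===== PORT A =====
-- literal transliteration of A: split on "\n", strip the indent prefix line by line
-- into an accumulator list, join with "\n".
def dedent_heredoc_body_py (body : String) (indent : String) : String :=
  if PySem.Str.len body == 0 then body        -- if not body: return body
  else
    let lines := PySem.Chars.splitOn body.toList ("\n".toList)   -- body.split("\n")
    if PySem.Str.len indent == 0 then body    -- if not indent: return body
    else
      let out_lines : List (List Char) := lines.foldl (fun acc ln =>
        if PySem.Chars.startswith ln indent.toList then
          acc ++ [PySem.List.slice ln (some (PySem.Chars.len indent.toList)) none]  -- ln[len(indent):]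
        else
          acc ++ [ln]) []
      String.ofList (PySem.Chars.join ("\n".toList) out_lines)   -- "\n".join(out_lines)

-- ===== PORT B =====
-- B is `re.sub(r'(?m)^' + re.escape(indent), '', body)`. The port models this regex
-- call directly and exactly on Pre_ (indent contains no newline): the MULTILINE '^'
-- anchors at the start of the string and after every '\n', so the substitution is a
-- single left-to-right scan that, at each line start, drops one literal occurrence of
-- `indent` if present and then copies the line through its newline.

-- one text line: the characters up to and including the first '\n', and the rest
def takeLine : List Char → List Char × List Char
  | [] => ([], [])
  | c :: cs =>
    if c = '\n' then ([c], cs)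
    else
      let p := takeLine cs
      (c :: p.1, p.2)

-- drop one literal occurrence of the (escaped) pattern at the anchor, if it matches
def stripPfx (ind : List Char) (cs : List Char) : List Char :=
  if ind.isPrefixOf cs then cs.drop ind.length else cs

theorem takeLine_snd_le (cs : List Char) : (takeLine cs).2.length ≤ cs.length := by
  induction cs with
  | nil => simp [takeLine]
  | cons c cs ih =>
    simp only [takeLine]
    split <;> simp <;> omega

theorem takeLine_stripPfx_lt (ind cs : List Char) (h : cs ≠ []) :
    (takeLine (stripPfx ind cs)).2.length < cs.length := by
  have h1 : (stripPfx ind cs).length ≤ cs.length := by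
    unfold stripPfx; split <;> simp
  rcases hcs' : stripPfx ind cs with _ | ⟨d, t⟩
  · simpa [takeLine] using List.length_pos_of_ne_nil h
  · have h2 := takeLine_snd_le t
    have h3 : (takeLine (d :: t)).2.length ≤ t.length := by
      simp only [takeLine]
      split <;> simp [h2]
    rw [hcs'] at h1
    simp at h1
    omega

-- the regex scan: at each line start drop the pattern if it matches, copy the line
def dedentGo (ind : List Char) (cs : List Char) : List Char :=
  if h : cs = [] then []
  else
    (takeLine (stripPfx ind cs)).1 ++ dedentGo ind (takeLine (stripPfx ind cs)).2
termination_by cs.length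
decreasing_by exact takeLine_stripPfx_lt ind cs h

def dedent_heredoc_body_py_alt (body : String) (indent : String) : String :=
  if PySem.Str.len body == 0 then body        -- if not body: return body
  else if PySem.Str.len indent == 0 then body -- if not indent: return body
  else String.ofList (dedentGo indent.toList body.toList)  -- re.sub(r'(?m)^'+re.escape(indent), '', body)

-- ===== PRECONDITION & SPEC =====
-- Pre_ excludes only inputs where the indent contains a newline AND occurs inside body:
-- there A's per-line split can never match a multi-line indent while B's multiline regex
-- can match across a line boundary, and no behaviour is specified for a multi-line
-- "indent" (A still returns a value there).
def Pre_dedent_heredoc_body_py (body : String) (indent : String) : Prop :=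
  '\n' ∉ indent.toList ∨ PySem.Str.isIn indent body = false

instance (body : String) (indent : String) : Decidable (Pre_dedent_heredoc_body_py body indent) := by
  unfold Pre_dedent_heredoc_body_py; infer_instance

def pvWitness_dedent_heredoc_body_py : String × String := ("  x\n  y\nz", "  ")

def Spec_dedent_heredoc_body_py (body : String) (indent : String) (out : String) : Prop :=
  out = dedent_heredoc_body_py_alt body indent

instance (body : String) (indent : String) (out : String) : Decidable (Spec_dedent_heredoc_body_py body indent out) := by
  unfold Spec_dedent_heredoc_body_py; infer_instance

-- ===== CLAIM (what is proved, stated in full; the proofs are below) =====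
def Claim_equal_dedent_heredoc_body_py : Prop := ∀ (body : String) (indent : String), Dom_dedent_heredoc_body_py body indent → Pre_dedent_heredoc_body_py body indent → Spec_dedent_heredoc_body_py body indent (dedent_heredoc_body_py body indent)

-- ===== LEMMAS AND PROOFS =====

-- the lines of a char list, split at every '\n' (Python str.split("\n"))
def linesOf : List Char → List (List Char)
  | [] => [[]]
  | c :: rest => if c = '\n' then [] :: linesOf rest else (linesOf rest).modifyHead (c :: ·)

theorem linesOf_ne_nil (s : List Char) : linesOf s ≠ [] := by
  cases s with
  | nil => simp [linesOf]
  | cons c rest =>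
    simp only [linesOf]
    split
    · simp
    · intro h
      have := congrArg List.length h
      simp at this
      exact linesOf_ne_nil rest this

theorem splitOn_go_spec : ∀ (fuel : Nat) (l cur : List Char) (acc : List (List Char)),
    l.length ≤ fuel →
    PySem.Chars.splitOn.go ['\n'] fuel l cur acc
      = acc.reverse ++ (linesOf l).modifyHead (cur.reverse ++ ·) := by
  intro fuel
  induction fuel with
  | zero =>
    intro l cur acc hl
    have : l = [] := List.eq_nil_of_length_eq_zero (Nat.le_zero.mp hl)
    subst this
    simp [PySem.Chars.splitOn.go, linesOf]
  | succ n ih =>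
    intro l cur acc hl
    cases l with
    | nil => simp [PySem.Chars.splitOn.go, linesOf]
    | cons c rest =>
      simp only [PySem.Chars.splitOn.go]
      by_cases hc : c = '\n'
      · subst hc
        have hpre : List.isPrefixOf ['\n'] ('\n' :: rest) = true := by
          simp [List.isPrefixOf]
        simp only [hpre, if_pos]
        rw [ih _ _ _ (by simpa using Nat.le_of_succ_le_succ hl)]
        obtain ⟨h, t, hht⟩ := List.exists_cons_of_ne_nil (linesOf_ne_nil rest)
        simp [linesOf, hht]
      · have hpre : List.isPrefixOf ['\n'] (c :: rest) = false := by
          simp [List.isPrefixOf]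
          exact fun h => absurd h.symm hc
        simp only [hpre]
        simp only [Bool.false_eq_true, if_false]
        rw [ih _ _ _ (by simpa using Nat.le_of_succ_le_succ hl)]
        simp only [linesOf, if_neg hc]
        congr 1
        obtain ⟨h, t, hht⟩ := List.exists_cons_of_ne_nil (linesOf_ne_nil rest)
        simp [hht]

theorem splitOn_eq_linesOf (s : List Char) :
    PySem.Chars.splitOn s ['\n'] = linesOf s := by
  unfold PySem.Chars.splitOn
  rw [splitOn_go_spec _ _ _ _ (by omega)]
  obtain ⟨h, t, hht⟩ := List.exists_cons_of_ne_nil (linesOf_ne_nil s)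
  rw [hht]
  simp

theorem linesOf_no_newline (a : List Char) (ha : '\n' ∉ a) : linesOf a = [a] := by
  induction a with
  | nil => simp [linesOf]
  | cons c rest ih =>
    simp only [linesOf]
    rw [if_neg (by simp at ha; exact fun h => ha.1 h.symm)]
    rw [ih (by simp at ha; exact ha.2)]
    simp

theorem linesOf_append_newline (a b : List Char) (ha : '\n' ∉ a) :
    linesOf (a ++ '\n' :: b) = a :: linesOf b := by
  induction a with
  | nil => simp [linesOf]
  | cons c rest ih =>
    simp only [List.cons_append, linesOf]
    rw [if_neg (by simp at ha; exact fun h => ha.1 h.symm)]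
    rw [ih (by simp at ha; exact ha.2)]
    simp

theorem takeLine_no_newline (a : List Char) (ha : '\n' ∉ a) : takeLine a = (a, []) := by
  induction a with
  | nil => simp [takeLine]
  | cons c rest ih =>
    simp only [takeLine]
    rw [if_neg (by simp at ha; exact fun h => ha.1 h.symm)]
    rw [ih (by simp at ha; exact ha.2)]

theorem takeLine_append_newline (a b : List Char) (ha : '\n' ∉ a) :
    takeLine (a ++ '\n' :: b) = (a ++ ['\n'], b) := by
  induction a with
  | nil => simp [takeLine]
  | cons c rest ih =>
    simp only [List.cons_append, takeLine]
    rw [if_neg (by simp at ha; exact fun h => ha.1 h.symm)]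
    rw [ih (by simp at ha; exact ha.2)]

theorem isPrefixOf_append_newline (ind : List Char) (hind : '\n' ∉ ind) :
    ∀ (a b : List Char), '\n' ∉ a →
    ind.isPrefixOf (a ++ '\n' :: b) = ind.isPrefixOf a := by
  induction ind with
  | nil => intro a b _; simp [List.isPrefixOf]
  | cons c ind' ih =>
    intro a b ha
    cases a with
    | nil =>
      simp only [List.nil_append, List.isPrefixOf]
      have : (c == '\n') = false := by
        simp at hind
        simp
        exact fun h => hind.1 h.symm
      simp [this]
    | cons d a' =>
      simp only [List.cons_append, List.isPrefixOf]
      rw [ih (by simp at hind; exact hind.2) a' b (by simp at ha; exact ha.2)]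

-- first-newline decomposition of a string containing '\n'
theorem split_first_newline (s : List Char) (hs : '\n' ∈ s) :
    ∃ a b, s = a ++ '\n' :: b ∧ '\n' ∉ a := by
  induction s with
  | nil => simp at hs
  | cons c rest ih =>
    by_cases hc : c = '\n'
    · exact ⟨[], rest, by simp [hc], by simp⟩
    · have : '\n' ∈ rest := by
        rcases List.mem_cons.mp hs with h | h
        · exact absurd h.symm hc
        · exact h
      obtain ⟨a, b, hab, hna⟩ := ih this
      exact ⟨c :: a, b, by simp [hab], by simp [hna]; exact fun h => hc h.symm⟩

-- main characterisation: the regex scan equals strip-each-line-and-rejoin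
theorem stripPfx_no_newline (ind s : List Char) (hs : '\n' ∉ s) : '\n' ∉ stripPfx ind s := by
  unfold stripPfx
  split
  · exact fun h => hs (List.mem_of_mem_drop h)
  · exact hs

theorem dedentGo_eq_join (ind : List Char) (hind : '\n' ∉ ind) (hne : ind ≠ []) :
    ∀ (s : List Char), dedentGo ind s = PySem.Chars.join ['\n'] ((linesOf s).map (stripPfx ind)) := by
  intro s
  induction hn : s.length using Nat.strong_induction_on generalizing s with
  | _ n ihn => ?_
  subst hn
  by_cases hmem : '\n' ∈ s
  · obtain ⟨a, b, rfl, hna⟩ := split_first_newline s hmem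
    have hslen : b.length < (a ++ '\n' :: b).length := by simp; omega
    have hsne : a ++ '\n' :: b ≠ [] := by simp
    rw [dedentGo, dif_neg hsne, linesOf_append_newline a b hna]
    by_cases hp : ind.isPrefixOf (a ++ '\n' :: b)
    · have hpa : ind.isPrefixOf a := by
        rw [isPrefixOf_append_newline ind hind a b hna] at hp; exact hp
      have hlen : ind.length ≤ a.length := (List.isPrefixOf_iff_prefix.mp hpa).length_le
      have hstrip : stripPfx ind (a ++ '\n' :: b) = a.drop ind.length ++ '\n' :: b := by
        unfold stripPfx; rw [if_pos hp, List.drop_append_of_le_length hlen]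
      have hnda : '\n' ∉ a.drop ind.length := fun h => hna (List.mem_of_mem_drop h)
      rw [hstrip, takeLine_append_newline _ _ hnda]
      have hsa : stripPfx ind a = a.drop ind.length := by unfold stripPfx; rw [if_pos hpa]
      rw [ihn b.length hslen b rfl]
      obtain ⟨h, t, hht⟩ := List.exists_cons_of_ne_nil (linesOf_ne_nil b)
      simp only [hht, List.map_cons, hsa, PySem.Chars.join_cons_cons]
    · have hpa : ind.isPrefixOf a = false := by
        rw [← isPrefixOf_append_newline ind hind a b hna]
        exact Bool.eq_false_iff.mpr hp
      have hstrip : stripPfx ind (a ++ '\n' :: b) = a ++ '\n' :: b := by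
        unfold stripPfx; rw [if_neg hp]
      have hsa : stripPfx ind a = a := by unfold stripPfx; rw [hpa]; simp
      rw [hstrip, takeLine_append_newline _ _ hna, ihn b.length hslen b rfl]
      obtain ⟨h, t, hht⟩ := List.exists_cons_of_ne_nil (linesOf_ne_nil b)
      simp only [hht, List.map_cons, hsa, PySem.Chars.join_cons_cons]
  · by_cases hsnil : s = []
    · subst hsnil
      obtain ⟨c, ind', rfl⟩ := List.exists_cons_of_ne_nil hne
      simp [dedentGo, linesOf, PySem.Chars.join_singleton, stripPfx, List.isPrefixOf]
    · rw [dedentGo, dif_neg hsnil,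
        takeLine_no_newline _ (stripPfx_no_newline ind s hmem),
        linesOf_no_newline s hmem]
      simp [dedentGo, PySem.Chars.join_singleton]

-- A's accumulator loop is map over the split lines
theorem foldl_strip (ind : List Char) : ∀ (l acc : List (List Char)),
    l.foldl (fun acc ln =>
      if PySem.Chars.startswith ln ind then
        acc ++ [PySem.List.slice ln (some (PySem.Chars.len ind)) none]
      else acc ++ [ln]) acc
      = acc ++ l.map (stripPfx ind) := by
  intro l
  induction l with
  | nil => simp
  | cons x l ih =>
    intro acc
    simp only [List.foldl_cons, List.map_cons]
    by_cases hx : PySem.Chars.startswith x ind = true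
    · rw [if_pos hx, ih]
      have h1 : stripPfx ind x = List.drop ind.length x := by
        unfold stripPfx
        rw [if_pos (by simpa [PySem.Chars.startswith] using hx)]
      have h2 : PySem.List.slice x (some (PySem.Chars.len ind)) none = List.drop ind.length x := by
        rw [PySem.Chars.len, PySem.List.slice_from x (by positivity)]
        simp
      rw [h1, h2]
      simp
    · rw [if_neg hx, ih]
      have h1 : stripPfx ind x = x := by
        unfold stripPfx
        rw [if_neg (by simpa [PySem.Chars.startswith] using hx)]
      rw [h1]
      simp

-- structure of takeLine: it splits its input, and the rest is a suffix
theorem takeLine_fst_append_snd (cs : List Char) : (takeLine cs).1 ++ (takeLine cs).2 = cs := by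
  induction cs with
  | nil => simp [takeLine]
  | cons c cs ih =>
    simp only [takeLine]
    split
    · simp
    · simpa using ih

theorem takeLine_snd_suffix (cs : List Char) : (takeLine cs).2 <:+ cs := by
  induction cs with
  | nil => simp [takeLine]
  | cons c cs ih =>
    simp only [takeLine]
    split
    · exact List.suffix_cons c cs
    · exact ih.trans (List.suffix_cons c cs)

-- when the pattern occurs nowhere in the string, the regex scan copies it unchanged
theorem dedentGo_id (ind s : List Char) (hno : ¬ ind <:+: s) :
    ∀ (t : List Char), t <:+ s → dedentGo ind t = t := by
  intro t
  induction hn : t.length using Nat.strong_induction_on generalizing t with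
  | _ n ihn => ?_
  subst hn
  intro hts
  by_cases htnil : t = []
  · subst htnil; rw [dedentGo]; simp
  · have hnp : ind.isPrefixOf t = false := by
      apply Bool.eq_false_iff.mpr
      intro h
      exact hno ((List.isPrefixOf_iff_prefix.mp h).isInfix.trans hts.isInfix)
    have hstrip : stripPfx ind t = t := by unfold stripPfx; rw [hnp]; simp
    have hlt : (takeLine t).2.length < t.length := by
      have := takeLine_stripPfx_lt ind t htnil
      rwa [hstrip] at this
    rw [dedentGo, dif_neg htnil, hstrip,
      ihn (takeLine t).2.length hlt (takeLine t).2 rfl ((takeLine_snd_suffix t).trans hts),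
      takeLine_fst_append_snd]

-- each split line is an infix of the string
theorem linesOf_head_prefix : ∀ (s h : List Char) (t : List (List Char)), linesOf s = h :: t → h <+: s := by
  intro s
  induction s with
  | nil => intro h t he; simp [linesOf] at he; simp [he.1]
  | cons c rest ih =>
    intro h t he
    simp only [linesOf] at he
    split at he
    · cases he; simp
    · obtain ⟨h', t', hht⟩ := List.exists_cons_of_ne_nil (linesOf_ne_nil rest)
      rw [hht] at he
      simp at he
      rw [← he.1]
      exact List.cons_prefix_cons.mpr ⟨rfl, ih h' t' hht⟩

theorem mem_linesOf_infix : ∀ (s l : List Char), l ∈ linesOf s → l <:+: s := by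
  intro s
  induction s with
  | nil => intro l hl; simp [linesOf] at hl; simp [hl]
  | cons c rest ih =>
    intro l hl
    simp only [linesOf] at hl
    split at hl
    · rcases List.mem_cons.mp hl with rfl | hl
      · simp
      · exact (ih l hl).trans (List.suffix_cons c rest).isInfix
    · obtain ⟨h', t', hht⟩ := List.exists_cons_of_ne_nil (linesOf_ne_nil rest)
      rw [hht] at hl
      simp at hl
      rcases hl with rfl | hl
      · exact (List.cons_prefix_cons.mpr ⟨rfl, linesOf_head_prefix rest h' t' hht⟩).isInfix
      · exact (ih l (by rw [hht]; exact List.mem_cons_of_mem _ hl)).trans (List.suffix_cons c rest).isInfix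

-- joining the split lines gives back the string
theorem join_linesOf (s : List Char) : PySem.Chars.join ['\n'] (linesOf s) = s := by
  induction s with
  | nil => simp [linesOf, PySem.Chars.join_singleton]
  | cons c rest ih =>
    simp only [linesOf]
    obtain ⟨h', t', hht⟩ := List.exists_cons_of_ne_nil (linesOf_ne_nil rest)
    split
    · rename_i hc
      rw [hht, PySem.Chars.join_cons_cons, ← hht, ih, hc]
      simp
    · rw [hht]
      simp only [List.modifyHead_cons]
      cases t' with
      | nil =>
        rw [PySem.Chars.join_singleton]
        rw [hht, PySem.Chars.join_singleton] at ih
        rw [ih]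
      | cons q t'' =>
        rw [PySem.Chars.join_cons_cons]
        rw [hht, PySem.Chars.join_cons_cons] at ih
        simp only [List.cons_append]
        rw [ih]

-- ===== VERDICT (by name: the statement is the Claim_ definition above) =====
theorem dedent_heredoc_body_py_spec : Claim_equal_dedent_heredoc_body_py := by
  intro body indent _ hpre
  unfold Spec_dedent_heredoc_body_py dedent_heredoc_body_py dedent_heredoc_body_py_alt
  by_cases hb : (PySem.Str.len body == 0) = true
  · simp only [hb, if_pos]
  · simp only [hb, Bool.false_eq_true, if_false]
    by_cases hi : (PySem.Str.len indent == 0) = true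
    · simp only [hi, if_pos]
    · simp only [hi, Bool.false_eq_true, if_false]
      have hne : indent.toList ≠ [] := by
        intro h
        apply hi
        simp [PySem.Str.len, h]
      congr 1
      have hnl : ("\n".toList) = ['\n'] := rfl
      rw [hnl, splitOn_eq_linesOf body.toList, foldl_strip indent.toList (linesOf body.toList) []]
      simp only [List.nil_append]
      rcases hpre with hpre | hno
      · rw [dedentGo_eq_join indent.toList hpre hne]
      · have hno' : ¬ indent.toList <:+: body.toList := by
          simpa using (PySem.Chars.isIn_eq_false_iff _ _).mp (by simpa using hno)
        rw [dedentGo_id indent.toList body.toList hno' body.toList (List.suffix_refl _)]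
        have hmap : (linesOf body.toList).map (stripPfx indent.toList) = linesOf body.toList := by
          rw [List.map_congr_left (g := id) ?_, List.map_id]
          intro l hl
          have : indent.toList.isPrefixOf l = false := by
            apply Bool.eq_false_iff.mpr
            intro h
            exact hno' ((List.isPrefixOf_iff_prefix.mp h).isInfix.trans (mem_linesOf_infix body.toList l hl))
          unfold stripPfx
          rw [this]
          simp
        rw [hmap, join_linesOf]
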